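-- pv_equiv track=rewrite | github.com/auishikpyne/Leetcode-Problem-Solve | 2206-divide-array-into-equal-pairs/2206-divide-array-into-equal-pairs.py | divideArray
-- ===== SOURCE A (Python) =====
-- from typing import List
--
-- def divideArray(nums: List[int]) -> bool:
--     dic = {}
--     for num in nums:
--         dic[num] = dic.get(num, 0) + 1
--
--     for value in dic.values():
--         if value % 2 != 0:
--             return False
--     else:
--         return True
-- ===== SOURCE B (Python) =====
-- def divideArray(nums):
--     s = sorted(nums)
--     def paired(t):
--         if not t:
--             return True
--         if len(t) == 1:
--             return False
--         return t[0] == t[1] and paired(t[2:])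
--     return paired(s)
-- ===== Notes on version B (the rewrite author's own statement) =====
-- stated objective: alternative
-- what changed: Replaces the frequency-dictionary parity check with sorting a copy and scanning adjacent pairs for equality.
import Mathlib
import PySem

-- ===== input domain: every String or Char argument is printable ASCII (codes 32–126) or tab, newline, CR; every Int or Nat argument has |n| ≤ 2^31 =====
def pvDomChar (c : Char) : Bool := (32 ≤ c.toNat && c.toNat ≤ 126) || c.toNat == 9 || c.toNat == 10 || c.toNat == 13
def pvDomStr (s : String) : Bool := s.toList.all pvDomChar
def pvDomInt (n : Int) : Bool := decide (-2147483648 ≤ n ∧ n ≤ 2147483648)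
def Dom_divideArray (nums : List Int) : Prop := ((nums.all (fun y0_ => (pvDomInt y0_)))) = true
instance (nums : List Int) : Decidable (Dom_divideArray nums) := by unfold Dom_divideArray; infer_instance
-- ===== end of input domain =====

-- B replaces A's frequency-dictionary parity check by sorting a copy and scanning adjacent pairs (alternative algorithm, same result).
-- ===== PORT A =====
def divideArray (nums : List Int) : Bool :=
  let dic := nums.foldl (fun d num => d.insert num (d.getD num 0 + 1)) PySem.Dict.empty
  -- for value in dic.values(): if value % 2 != 0: return False / else: return True
  dic.values.all (fun v => PySem.Int.mod v 2 == 0)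

-- ===== PORT B =====
-- inner helper 'paired' of Source B: empty → True, singleton → False, else t[0]==t[1] and paired(t[2:])
def pairedB : List Int → Bool
  | [] => true
  | [_] => false
  | a :: b :: t => a == b && pairedB t

def divideArray_alt (nums : List Int) : Bool :=
  pairedB (PySem.List.sorted nums (fun x => x) false)

-- ===== PRECONDITION & SPEC =====
def Spec_divideArray (nums : List Int) (out : Bool) : Prop := out = divideArray_alt nums
instance (nums : List Int) (out : Bool) : Decidable (Spec_divideArray nums out) := by unfold Spec_divideArray; infer_instance

-- ===== CLAIM (what is proved, stated in full; the proofs are below) =====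
def Claim_equal_divideArray : Prop := ∀ (nums : List Int), Dom_divideArray nums → Spec_divideArray nums (divideArray nums)

-- ===== LEMMAS AND PROOFS =====

-- A returns true iff every element's multiplicity is even.
theorem divideArray_iff (nums : List Int) :
    divideArray nums = true ↔ ∀ x ∈ nums, nums.count x % 2 = 0 := by
  unfold divideArray
  rw [PySem.Dict.foldl_insert_getD_add_one_eq_counter]
  have hv : (PySem.Dict.counter nums).values
      = (PySem.Set.ofList nums).map (fun k => (nums.count k : Int)) := by
    simp [PySem.Dict.values, PySem.Dict.items_counter, List.map_map, Function.comp]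
  simp only [hv, List.all_map, List.all_eq_true]
  constructor
  · intro h x hx
    have := h x (by simpa [PySem.Set.mem_ofList] using hx)
    simp only [Function.comp, beq_iff_eq] at this
    rw [PySem.Int.mod_eq_emod_of_pos (by omega)] at this
    omega
  · intro h k hk
    have hm : k ∈ nums := by simpa [PySem.Set.mem_ofList] using hk
    have := h k hm
    simp only [Function.comp, beq_iff_eq]
    rw [PySem.Int.mod_eq_emod_of_pos (by omega)]
    omega

-- On a (≤)-sorted list, the pairwise scan succeeds iff every multiplicity is even.
theorem pairedB_iff (l : List Int) (hs : l.Pairwise (· ≤ ·)) :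
    pairedB l = true ↔ ∀ x ∈ l, l.count x % 2 = 0 := by
  induction l using pairedB.induct with
  | case1 => simp [pairedB]
  | case2 a => simp [pairedB, List.count_cons]
  | case3 a b t ih =>
    rcases hs with - | ⟨hab, hs⟩
    rcases hs with - | ⟨hbt, hst⟩
    have ha_b : a ≤ b := hab b (by simp)
    by_cases hab' : a = b
    · subst hab'
      simp only [pairedB, beq_self_eq_true, Bool.true_and]
      rw [ih hst]
      constructor
      · intro h x hx
        by_cases hxa : x = a
        · subst hxa
          by_cases hxt : x ∈ t
          · have := h x hxt
            simp only [List.count_cons_self]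
            omega
          · simp [List.count_eq_zero_of_not_mem hxt]
        · have hxt : x ∈ t := by
            rcases List.mem_cons.mp hx with h1 | h2
            · exact absurd h1 hxa
            · rcases List.mem_cons.mp h2 with h1 | h2
              · exact absurd h1 hxa
              · exact h2
          have := h x hxt
          have e : List.count x (a :: a :: t) = List.count x t := by
            simp [show a ≠ x from fun h => hxa h.symm]
          omega
      · intro h x hx
        have := h x (List.mem_cons_of_mem _ (List.mem_cons_of_mem _ hx))
        by_cases hxa : x = a
        · subst hxa
          simp only [List.count_cons_self] at this
          omega
        · have e : List.count x (a :: a :: t) = List.count x t := by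
            simp [show a ≠ x from fun h => hxa h.symm]
          omega
    · constructor
      · intro h
        simp [pairedB, hab'] at h
      · intro h
        exfalso
        have hlt : a < b := lt_of_le_of_ne ha_b hab'
        have hanb : a ∉ b :: t := by
          intro hm
          rcases List.mem_cons.mp hm with h1 | h2
          · exact hab' h1
          · exact absurd (hbt a h2) (not_le.mpr hlt)
        have := h a (by simp)
        rw [List.count_cons_self, List.count_eq_zero_of_not_mem hanb] at this
        omega

-- ===== VERDICT (by name: the statement is the Claim_ definition above) =====
theorem divideArray_spec : Claim_equal_divideArray := by
  intro nums _
  unfold Spec_divideArray divideArray_alt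
  have hperm : (PySem.List.sorted nums (fun x => x) false).Perm nums :=
    PySem.List.sorted_perm nums (fun x => x) false
  rw [Bool.eq_iff_iff, divideArray_iff,
    pairedB_iff _ (PySem.List.sorted_pairwise nums (fun x => x))]
  constructor
  · intro h x hx
    rw [hperm.count_eq]
    exact h x (hperm.mem_iff.mp hx)
  · intro h x hx
    rw [← hperm.count_eq]
    exact h x (hperm.mem_iff.mpr hx)
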